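-- pv_equiv track=rewrite | github.com/Julnowak/Optymalizacja-wielokryterialna | lab1/Algorithms/Algorytm3_new.py | find_optimum_according_to_directions
-- ===== SOURCE A (Python) =====
-- from typing import List
--
-- def find_optimum_according_to_directions(X: List[List[int]], directions):
--     result: List[int] = []
--
--     for i in range(len(directions)):
--         if directions[i] == "min":
--             result.append(min([x[i] for x in X]))
--         elif directions[i] == "max":
--             result.append(max([x[i] for x in X]))
--
--     return result
-- ===== SOURCE B (Python) =====
-- def find_optimum_according_to_directions(X, directions):
--     # single pass over rows with running per-column accumulators (vs per-column rescans)
--     pairs = [(i, d) for i, d in enumerate(directions) if d == "min" or d == "max"]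
--     if not pairs:
--         return []
--     first, *rest = X
--     accs = [first[i] for i, _ in pairs]
--     for row in rest:
--         accs = [min(a, row[i]) if d == "min" else max(a, row[i])
--                 for a, (i, d) in zip(accs, pairs)]
--     return accs
-- ===== Notes on version B (the rewrite author's own statement) =====
-- stated objective: alternative
-- what changed: Instead of looping over directions and rescanning all rows per column, B gathers the valid (index, direction) pairs once, seeds accumulators from the first row and updates them in a single pass over the remaining rows.
import Mathlib
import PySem

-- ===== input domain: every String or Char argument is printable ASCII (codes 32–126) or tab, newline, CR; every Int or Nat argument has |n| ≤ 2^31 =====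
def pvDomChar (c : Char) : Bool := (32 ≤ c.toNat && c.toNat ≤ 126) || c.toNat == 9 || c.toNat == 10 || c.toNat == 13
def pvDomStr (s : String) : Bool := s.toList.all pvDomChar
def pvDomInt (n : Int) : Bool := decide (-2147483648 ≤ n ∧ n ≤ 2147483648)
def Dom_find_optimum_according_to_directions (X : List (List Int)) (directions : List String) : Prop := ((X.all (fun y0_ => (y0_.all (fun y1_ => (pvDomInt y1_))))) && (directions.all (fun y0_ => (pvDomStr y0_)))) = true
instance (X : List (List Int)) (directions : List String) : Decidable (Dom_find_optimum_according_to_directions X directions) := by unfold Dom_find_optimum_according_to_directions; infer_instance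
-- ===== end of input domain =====

-- B replaces A's per-direction column rescans by one pass over rows with running per-column accumulators (alternative decomposition, same cost).


-- ===== PORT A =====
-- for i in range(len(directions)): if directions[i]=="min": append(min([x[i] for x in X])) elif =="max": append(max(...))
-- min([])/max([]) raise ValueError (→ .getD 0 default, outside Pre_); x[i] raises IndexError out of range (→ pyGetD default, outside Pre_)
def find_optimum_according_to_directions (X : List (List Int)) (directions : List String) : List Int :=
  (PySem.List.pyRange 0 (directions.length : Int) 1).foldl
    (fun result i =>
      if PySem.List.pyGetD directions i "" = "min" then
        result ++ [(PySem.List.min? (X.map (fun x => PySem.List.pyGetD x i 0)) (fun y => y)).getD 0]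
      else if PySem.List.pyGetD directions i "" = "max" then
        result ++ [(PySem.List.max? (X.map (fun x => PySem.List.pyGetD x i 0)) (fun y => y)).getD 0]
      else result) []

-- ===== PORT B =====
-- pairs = [(i, d) for i, d in enumerate(directions) if d == "min" or d == "max"]
def pvPairs (directions : List String) : List (Int × String) :=
  (PySem.List.enumerate directions).filter
    (fun p => decide (p.2 = "min") || decide (p.2 = "max"))

-- accs = [min(a,row[i]) if d=="min" else max(a,row[i]) for a,(i,d) in zip(accs,pairs)]
def pvStep (pairs : List (Int × String)) (accs : List Int) (row : List Int) : List Int :=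
  (accs.zip pairs).map (fun ap =>
    if ap.2.2 = "min" then min ap.1 (PySem.List.pyGetD row ap.2.1 0)
    else max ap.1 (PySem.List.pyGetD row ap.2.1 0))

def find_optimum_according_to_directions_alt (X : List (List Int)) (directions : List String) : List Int :=
  if (pvPairs directions).isEmpty then []
  else
    match X with
    | [] => []  -- Python B raises here (empty X with a valid direction): outside Pre_
    | first :: rest =>
        rest.foldl (pvStep (pvPairs directions))
          ((pvPairs directions).map (fun p => PySem.List.pyGetD first p.1 0))

-- ===== PRECONDITION & SPEC =====
-- Pre_ excludes exactly the inputs where Python A raises: a 'min'/'max' direction with X empty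
-- (ValueError from min/max of []) or with some row too short for that column (IndexError).
def Pre_find_optimum_according_to_directions (X : List (List Int)) (directions : List String) : Prop :=
  ∀ p ∈ PySem.List.enumerate directions, (p.2 = "min" ∨ p.2 = "max") →
    X ≠ [] ∧ ∀ x ∈ X, p.1 < (x.length : Int)
instance (X : List (List Int)) (directions : List String) : Decidable (Pre_find_optimum_according_to_directions X directions) := by unfold Pre_find_optimum_according_to_directions; infer_instance

def pvWitness_find_optimum_according_to_directions : List (List Int) × List String :=
  ([[1, 2], [3, 0]], ["min", "max"])

def Spec_find_optimum_according_to_directions (X : List (List Int)) (directions : List String) (out : List Int) : Prop := out = find_optimum_according_to_directions_alt X directions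
instance (X : List (List Int)) (directions : List String) (out : List Int) : Decidable (Spec_find_optimum_according_to_directions X directions out) := by unfold Spec_find_optimum_according_to_directions; infer_instance

-- ===== CLAIM (what is proved, stated in full; the proofs are below) =====
def Claim_equal_find_optimum_according_to_directions : Prop := ∀ (X : List (List Int)) (directions : List String), Dom_find_optimum_according_to_directions X directions → Pre_find_optimum_according_to_directions X directions → Spec_find_optimum_according_to_directions X directions (find_optimum_according_to_directions X directions)

-- ===== LEMMAS AND PROOFS =====

-- the per-column answer both programs compute
def pvCol (X : List (List Int)) (i : Int) (d : String) : Int :=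
  if d = "min" then (PySem.List.min? (X.map (fun x => PySem.List.pyGetD x i 0)) (fun y => y)).getD 0
  else (PySem.List.max? (X.map (fun x => PySem.List.pyGetD x i 0)) (fun y => y)).getD 0

def pvQ (dirs : List String) (k : Nat) : Bool :=
  decide (dirs.getD k "" = "min") || decide (dirs.getD k "" = "max")

def pvE (dirs : List String) (k : Nat) : Int × String := ((k : Int), dirs.getD k "")

def pvL (dirs : List String) : List Nat := (List.range dirs.length).filter (pvQ dirs)

theorem pv_enumerate_eq (dirs : List String) : ∀ s : Int,
    PySem.List.enumerate dirs s
      = (List.range dirs.length).map (fun k : Nat => (s + (k : Int), dirs.getD k "")) := by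
  induction dirs with
  | nil => intro s; simp [PySem.List.enumerate]
  | cons x xs ih =>
      intro s
      simp [PySem.List.enumerate, List.range_succ_eq_map, ih (s + 1), List.map_map,
        Function.comp]
      intro a _
      ring

theorem pv_enumerate_zero (dirs : List String) :
    PySem.List.enumerate dirs 0 = (List.range dirs.length).map (pvE dirs) := by
  rw [pv_enumerate_eq dirs 0]
  apply List.map_congr_left
  intro k _
  simp [pvE]

theorem pv_pairs_eq (dirs : List String) :
    pvPairs dirs = (pvL dirs).map (pvE dirs) := by
  unfold pvPairs pvL
  rw [pv_enumerate_zero, List.filter_map]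
  rfl

theorem pv_A_eq (X : List (List Int)) (dirs : List String) :
    find_optimum_according_to_directions X dirs
      = (pvL dirs).map (fun k : Nat => pvCol X (k : Int) (dirs.getD k "")) := by
  unfold find_optimum_according_to_directions
  have hfun : (fun (result : List Int) (i : Int) =>
      if PySem.List.pyGetD dirs i "" = "min" then
        result ++ [(PySem.List.min? (X.map (fun x => PySem.List.pyGetD x i 0)) (fun y => y)).getD 0]
      else if PySem.List.pyGetD dirs i "" = "max" then
        result ++ [(PySem.List.max? (X.map (fun x => PySem.List.pyGetD x i 0)) (fun y => y)).getD 0]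
      else result)
      = (fun result i =>
        if (decide (PySem.List.pyGetD dirs i "" = "min") || decide (PySem.List.pyGetD dirs i "" = "max")) = true
        then result ++ [pvCol X i (PySem.List.pyGetD dirs i "")] else result) := by
    funext result i
    by_cases h1 : PySem.List.pyGetD dirs i "" = "min" <;>
      by_cases h2 : PySem.List.pyGetD dirs i "" = "max" <;>
      simp [h1, h2, pvCol]
  rw [hfun, PySem.List.foldl_append_if, PySem.List.pyRange_one]
  have hnn : (((dirs.length : Int) - 0).toNat) = dirs.length := by omega
  rw [hnn, List.nil_append, List.filter_map, List.map_map]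
  unfold pvL
  have hQ : ((fun i => decide (PySem.List.pyGetD dirs i "" = "min") ||
        decide (PySem.List.pyGetD dirs i "" = "max")) ∘ (fun k : Nat => (0 : Int) + (k : Int)))
      = pvQ dirs := by
    funext k
    simp [Function.comp, pvQ, PySem.List.pyGetD_natCast]
  rw [hQ]
  apply List.map_congr_left
  intro k _
  simp [Function.comp, pvCol, PySem.List.pyGetD_natCast]

theorem pv_zip_self {α : Type} (l : List α) : l.zip l = l.map (fun x => (x, x)) := by
  induction l with
  | nil => rfl
  | cons a t ih => simp [List.zip_cons_cons, ih]

theorem pv_step_map (pairs : List (Int × String)) (g : Int × String → Int) (row : List Int) :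
    pvStep pairs (pairs.map g) row
      = pairs.map (fun p =>
          if p.2 = "min" then min (g p) (PySem.List.pyGetD row p.1 0)
          else max (g p) (PySem.List.pyGetD row p.1 0)) := by
  unfold pvStep
  rw [List.zip_map_left, pv_zip_self, List.map_map, List.map_map]
  rfl

theorem pv_fold_map (rest : List (List Int)) (pairs : List (Int × String)) : ∀ g : Int × String → Int,
    rest.foldl (pvStep pairs) (pairs.map g)
      = pairs.map (fun p => rest.foldl
          (fun a row => if p.2 = "min" then min a (PySem.List.pyGetD row p.1 0)
                        else max a (PySem.List.pyGetD row p.1 0)) (g p)) := by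
  induction rest with
  | nil => intro g; simp
  | cons r rs ih =>
      intro g
      simp only [List.foldl_cons, pv_step_map]
      exact ih _

theorem pv_col_fold (first : List Int) (rest : List (List Int)) (i : Int) (d : String) :
    rest.foldl (fun a row => if d = "min" then min a (PySem.List.pyGetD row i 0)
                             else max a (PySem.List.pyGetD row i 0))
        (PySem.List.pyGetD first i 0)
      = pvCol (first :: rest) i d := by
  unfold pvCol
  by_cases hd : d = "min" <;>
    simp [hd, PySem.List.min?_id_cons, PySem.List.max?_id_cons, List.foldl_map]

theorem pv_B_eq (X : List (List Int)) (dirs : List String)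
    (hpre : Pre_find_optimum_according_to_directions X dirs) :
    find_optimum_according_to_directions_alt X dirs
      = (pvL dirs).map (fun k : Nat => pvCol X (k : Int) (dirs.getD k "")) := by
  unfold find_optimum_according_to_directions_alt
  rw [pv_pairs_eq]
  by_cases hemp : pvL dirs = []
  · simp [hemp]
  · have hfalse : (((pvL dirs).map (pvE dirs)).isEmpty) = false := by
      simp [hemp]
    rw [hfalse]
    simp only [Bool.false_eq_true, if_false]
    obtain ⟨k0, hk0⟩ := List.exists_mem_of_ne_nil _ hemp
    have hk0q : pvQ dirs k0 = true := List.of_mem_filter hk0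
    have hXne : X ≠ [] := by
      have hmem : pvE dirs k0 ∈ PySem.List.enumerate dirs 0 := by
        rw [pv_enumerate_zero]
        exact List.mem_map_of_mem (List.mem_of_mem_filter hk0)
      have hvalid : (pvE dirs k0).2 = "min" ∨ (pvE dirs k0).2 = "max" := by
        unfold pvQ at hk0q
        unfold pvE
        simpa using hk0q
      exact (hpre _ hmem hvalid).1
    match X, hXne with
    | first :: rest, _ =>
      dsimp only
      rw [pv_fold_map]
      rw [List.map_map]
      apply List.map_congr_left
      intro k hk
      simp only [Function.comp]
      exact pv_col_fold first rest ((k : Nat) : Int) (dirs.getD k "")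

-- ===== VERDICT (by name: the statement is the Claim_ definition above) =====
theorem find_optimum_according_to_directions_spec : Claim_equal_find_optimum_according_to_directions := by
  intro X dirs _ hpre
  unfold Spec_find_optimum_according_to_directions
  rw [pv_A_eq, pv_B_eq X dirs hpre]
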